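-- pv_equiv track=rewrite | github.com/ccc013/CodesNotes | Python_100_examples/example1.py | create_three_digits
-- ===== SOURCE A (Python) =====
-- def create_three_digits(number_start=1, number_end=4):
--     '''
--     给定指定数字范围（比如1到4），求可以组成多少个无重复的三位数
--     :param number_start: 起始数字
--     :param number_end: 结束数字
--     :return: 返回数量，以及可能的三位数的列表
--     '''
--     count = 0
--     result_list = list()
--     for i in range(number_start, number_end + 1):
--         for j in range(number_start, number_end + 1):
--             for k in range(number_start, number_end + 1):
--                 if (i != j) and (i != k) and (j != k):
--                     count += 1
--                     result_list.append(str(i) + str(j) + str(k))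
--     return count, result_list
-- ===== SOURCE B (Python) =====
-- def create_three_digits(number_start=1, number_end=4):
--     '''Removal-based permutation recursion: pick a digit, recurse on the pool
--     without it; no nested range loops and no distinctness guard.'''
--     def perms(pool, k):
--         # only ever called with k >= 1 (top-level call uses k = 3)
--         if k == 1:
--             return [str(d) for d in pool]
--         return [str(pool[i]) + s
--                 for i in range(len(pool))
--                 for s in perms(pool[:i] + pool[i + 1:], k - 1)]
--     result_list = perms(list(range(number_start, number_end + 1)), 3)
--     return len(result_list), result_list
-- ===== Notes on version B (the rewrite author's own statement) =====
-- stated objective: alternative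
-- what changed: A's three nested range loops enumerating every triple and filtering with an i!=j!=k guard are replaced by a removal-based permutation recursion (pick a digit at each index, recurse on the pool with it sliced out), generating only valid triples and taking len() at the end instead of an incremented counter.
import Mathlib
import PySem

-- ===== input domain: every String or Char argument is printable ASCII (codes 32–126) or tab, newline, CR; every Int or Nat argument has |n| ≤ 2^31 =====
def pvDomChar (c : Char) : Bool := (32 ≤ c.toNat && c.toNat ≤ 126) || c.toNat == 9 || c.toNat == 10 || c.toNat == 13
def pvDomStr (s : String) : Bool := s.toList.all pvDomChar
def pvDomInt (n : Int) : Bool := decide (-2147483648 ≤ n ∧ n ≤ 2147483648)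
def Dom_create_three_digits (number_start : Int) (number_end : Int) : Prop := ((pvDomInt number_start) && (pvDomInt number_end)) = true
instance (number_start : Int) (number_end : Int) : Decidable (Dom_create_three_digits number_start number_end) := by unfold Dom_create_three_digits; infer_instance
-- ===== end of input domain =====

-- ===== PORT A =====
-- B replaces A's three nested range loops with a distinctness guard by a removal-based
-- permutation recursion (pick a digit, recurse on the pool without it); same return value.
-- B changes nested-loops-with-distinctness-guard into a removal-based permutation recursion (alternative decomposition).
def create_three_digits (number_start : Int) (number_end : Int) : Int × List String :=
  let r := PySem.List.pyRange number_start (number_end + 1) 1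
  (r.foldl (fun st i =>
    r.foldl (fun st j =>
      r.foldl (fun st k =>
        if i ≠ j ∧ i ≠ k ∧ j ≠ k then
          (st.1 + 1, st.2 ++ [PySem.Int.toStr i ++ PySem.Int.toStr j ++ PySem.Int.toStr k])
        else st) st) st) ((0 : Int), ([] : List String)))

-- ===== PORT B =====
-- perms(pool, k): pool[i] is in range for every i of range(len(pool)), so pyGetD is exact here;
-- Python's perms is only ever invoked with k = 3 (hence k ∈ {3,2,1}); the k = 0 value is arbitrary.
def pvPerms (pool : List Int) : Nat → List String
  | 0 => []
  | 1 => pool.map PySem.Int.toStr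
  | Nat.succ (Nat.succ k) =>
      (PySem.List.pyRange 0 (pool.length : Int) 1).flatMap (fun i =>
        (pvPerms (PySem.List.slice pool none (some i) ++ PySem.List.slice pool (some (i + 1)) none)
            (Nat.succ k)).map
          (fun s => PySem.Int.toStr (PySem.List.pyGetD pool i 0) ++ s))

def create_three_digits_alt (number_start : Int) (number_end : Int) : Int × List String :=
  let result_list := pvPerms (PySem.List.pyRange number_start (number_end + 1) 1) 3
  ((result_list.length : Int), result_list)

-- ===== PRECONDITION & SPEC =====
def Spec_create_three_digits (number_start : Int) (number_end : Int) (out : Int × List String) : Prop := out = create_three_digits_alt number_start number_end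
instance (number_start : Int) (number_end : Int) (out : Int × List String) : Decidable (Spec_create_three_digits number_start number_end out) := by unfold Spec_create_three_digits; infer_instance

-- ===== CLAIM (what is proved, stated in full; the proofs are below) =====
def Claim_equal_create_three_digits : Prop := ∀ (number_start : Int) (number_end : Int), Dom_create_three_digits number_start number_end → Spec_create_three_digits number_start number_end (create_three_digits number_start number_end)

-- ===== LEMMAS AND PROOFS =====

-- abbreviation used only by the proofs: A's inner-loop contribution for fixed i, j
def pvInn (r : List Int) (i j : Int) : List String :=
  (r.filter (fun k => decide (i ≠ j ∧ i ≠ k ∧ j ≠ k))).map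
    (fun k => PySem.Int.toStr i ++ PySem.Int.toStr j ++ PySem.Int.toStr k)

def pvMid (r : List Int) (i : Int) : List String := r.flatMap (pvInn r i)

def pvTotal (r : List Int) : List String := r.flatMap (pvMid r)

theorem pv_flatMap_congr {a b : Type} {l : List a} {f g : a → List b}
    (h : ∀ x ∈ l, f x = g x) : l.flatMap f = l.flatMap g := by
  induction l with
  | nil => rfl
  | cons x t ih =>
      simp only [List.flatMap_cons, h x (List.mem_cons_self), ih (fun y hy => h y (List.mem_cons_of_mem _ hy))]

theorem pv_flatMap_filter {a b : Type} {l : List a} {q : a → Bool} {f : a → List b}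
    (h : ∀ x ∈ l, q x = false → f x = []) : l.flatMap f = (l.filter q).flatMap f := by
  induction l with
  | nil => rfl
  | cons x t ih =>
      have ih' := ih (fun y hy hq => h y (List.mem_cons_of_mem _ hy) hq)
      by_cases hx : q x = true
      · simp [hx, ih']
      · have hxf : q x = false := by simpa using hx
        simp [hxf, h x List.mem_cons_self hxf, ih']

-- a conditional count-and-append foldl is filter + map, with the counter tracking the length
theorem pv_foldl_count_append (c : Int → Prop) [DecidablePred c] (g : Int → String) :
    ∀ (xs : List Int) (n : Int) (l : List String),
      xs.foldl (fun st k => if c k then (st.1 + 1, st.2 ++ [g k]) else st) (n, l)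
        = (n + (((xs.filter (fun k => decide (c k))).length : Int)),
           l ++ (xs.filter (fun k => decide (c k))).map g) := by
  intro xs
  induction xs with
  | nil => intro n l; simp
  | cons x t ih =>
      intro n l
      by_cases hx : c x
      · simp [List.foldl_cons, hx, ih]
        omega
      · simp [List.foldl_cons, hx, ih]

-- a foldl that adds a block and its length each step is flatMap, counter = total length
theorem pv_foldl_sum_append (h : Int → List String) :
    ∀ (xs : List Int) (n : Int) (l : List String),
      xs.foldl (fun st x => (st.1 + (((h x).length : Int)), st.2 ++ h x)) (n, l)
        = (n + ((xs.flatMap h).length : Int), l ++ xs.flatMap h) := by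
  intro xs
  induction xs with
  | nil => intro n l; simp
  | cons x t ih =>
      intro n l
      simp [List.foldl_cons, ih]
      omega

theorem pv_A_general (r : List Int) :
    r.foldl (fun st i =>
      r.foldl (fun st j =>
        r.foldl (fun st k =>
          if i ≠ j ∧ i ≠ k ∧ j ≠ k then
            (st.1 + 1, st.2 ++ [PySem.Int.toStr i ++ PySem.Int.toStr j ++ PySem.Int.toStr k])
          else st) st) st) ((0 : Int), ([] : List String))
      = (((pvTotal r).length : Int), pvTotal r) := by
  have hinner : ∀ i : Int,
      (fun (st : Int × List String) (j : Int) =>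
        r.foldl (fun st k =>
          if i ≠ j ∧ i ≠ k ∧ j ≠ k then
            (st.1 + 1, st.2 ++ [PySem.Int.toStr i ++ PySem.Int.toStr j ++ PySem.Int.toStr k])
          else st) st)
      = (fun (st : Int × List String) (j : Int) =>
          (st.1 + ((pvInn r i j).length : Int), st.2 ++ pvInn r i j)) := by
    intro i
    funext st j
    cases st with
    | mk n l =>
        have := pv_foldl_count_append (fun k => i ≠ j ∧ i ≠ k ∧ j ≠ k)
          (fun k => PySem.Int.toStr i ++ PySem.Int.toStr j ++ PySem.Int.toStr k) r n l
        simpa [pvInn] using this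
  have hmid :
      (fun (st : Int × List String) (i : Int) =>
        r.foldl (fun st j =>
          r.foldl (fun st k =>
            if i ≠ j ∧ i ≠ k ∧ j ≠ k then
              (st.1 + 1, st.2 ++ [PySem.Int.toStr i ++ PySem.Int.toStr j ++ PySem.Int.toStr k])
            else st) st) st)
      = (fun (st : Int × List String) (i : Int) =>
          (st.1 + ((pvMid r i).length : Int), st.2 ++ pvMid r i)) := by
    funext st i
    cases st with
    | mk n l =>
        rw [hinner i]
        simpa [pvMid] using pv_foldl_sum_append (pvInn r i) r n l
  rw [hmid]
  simpa [pvTotal] using pv_foldl_sum_append (pvMid r) r 0 []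

theorem pv_A_closed (ns ne : Int) :
    create_three_digits ns ne
      = (((pvTotal (PySem.List.pyRange ns (ne + 1) 1)).length : Int),
         pvTotal (PySem.List.pyRange ns (ne + 1) 1)) :=
  pv_A_general (PySem.List.pyRange ns (ne + 1) 1)

-- recursive view of B's "all (chosen, pool-without-chosen) pairs" comprehension (proof-only)
def pvPicksRec : List Int → List (Int × List Int)
  | [] => []
  | h :: t => (h, t) :: (pvPicksRec t).map (fun p => (p.1, h :: p.2))

theorem pv_picks_formula (pool : List Int) :
    (List.range pool.length).map (fun k => (pool.getD k 0, pool.take k ++ pool.drop (k + 1)))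
      = pvPicksRec pool := by
  induction pool with
  | nil => rfl
  | cons h t ih =>
      simp only [pvPicksRec, List.length_cons, List.range_succ_eq_map, List.map_cons, List.map_map]
      congr 1
      rw [← ih, List.map_map]
      apply List.map_congr_left
      intro k _
      simp [List.take_succ_cons, List.drop_succ_cons]

theorem pv_range_picks (pool : List Int) :
    (PySem.List.pyRange 0 (pool.length : Int) 1).map (fun i =>
        (PySem.List.pyGetD pool i 0,
         PySem.List.slice pool none (some i) ++ PySem.List.slice pool (some (i + 1)) none))
      = pvPicksRec pool := by
  rw [← pv_picks_formula pool, PySem.List.pyRange_one]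
  simp only [Int.sub_zero, Int.toNat_natCast, List.map_map]
  apply List.map_congr_left
  intro k _
  have h1 : (0 : Int) + (k : Int) = ((k : Nat) : Int) := by ring
  have h2 : (k : Int) + 1 = (((k + 1 : Nat)) : Int) := by push_cast; ring
  simp only [Function.comp_def, h1, h2, PySem.List.pyGetD_natCast,
    PySem.List.slice_to_natCast, PySem.List.slice_from_natCast]

theorem pv_expand (pool : List Int) (k : Nat) :
    pvPerms pool (k + 2)
      = (pvPicksRec pool).flatMap
          (fun p => (pvPerms p.2 (k + 1)).map (fun s => PySem.Int.toStr p.1 ++ s)) := by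
  show (PySem.List.pyRange 0 (pool.length : Int) 1).flatMap _ = _
  rw [← pv_range_picks pool, List.flatMap_map]

theorem pv_picks_eq (l : List Int) (hl : l.Nodup) :
    pvPicksRec l = l.map (fun d => (d, l.filter (fun x => decide (x ≠ d)))) := by
  induction l with
  | nil => rfl
  | cons h t ih =>
      have hnotin : h ∉ t := (List.nodup_cons.mp hl).1
      have ht : t.Nodup := (List.nodup_cons.mp hl).2
      have htf : t.filter (fun x => !decide (x = h)) = t :=
        List.filter_eq_self.mpr (fun a ha => by
          simp only [Bool.not_eq_eq_eq_not, Bool.not_true, decide_eq_false_iff_not]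
          exact fun e => hnotin (e ▸ ha))
      simp only [pvPicksRec, ih ht, List.map_map, List.map_cons, List.filter_cons]
      congr 1
      · simp [htf]
      · apply List.map_congr_left
        intro d hd
        have hdh : h ≠ d := fun e => hnotin (e ▸ hd)
        simp [Function.comp, hdh]

theorem pv_perms_two (l : List Int) (hl : l.Nodup) :
    pvPerms l 2
      = l.flatMap (fun b => (l.filter (fun x => decide (x ≠ b))).map
          (fun c => PySem.Int.toStr b ++ PySem.Int.toStr c)) := by
  rw [show (2 : Nat) = 0 + 2 from rfl, pv_expand, pv_picks_eq l hl]
  simp [List.flatMap_map, pvPerms, List.map_map, Function.comp_def]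

theorem pv_mid_eq (l : List Int) (i : Int) :
    pvMid l i = (l.filter (fun x => decide (x ≠ i))).flatMap (fun j =>
      ((l.filter (fun x => decide (x ≠ i))).filter (fun x => decide (x ≠ j))).map
        (fun c => PySem.Int.toStr i ++ (PySem.Int.toStr j ++ PySem.Int.toStr c))) := by
  unfold pvMid pvInn
  rw [pv_flatMap_filter (q := fun j => decide (j ≠ i))
    (by
      intro j hj hq
      have hji : j = i := by simpa using hq
      subst hji
      simp)]
  apply pv_flatMap_congr
  intro j hj
  have hji : j ≠ i := by simpa using (List.mem_filter.mp hj).2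
  rw [List.filter_filter]
  have hfe : l.filter (fun k => decide (i ≠ j ∧ i ≠ k ∧ j ≠ k))
      = l.filter (fun k => decide (k ≠ j) && decide (k ≠ i)) := by
    apply List.filter_congr
    intro k _
    by_cases hk1 : k = i <;> by_cases hk2 : k = j <;>
      simp [hk1, hk2, hji, Ne.symm hji] <;> tauto
  rw [hfe]
  apply List.map_congr_left
  intro c _
  exact String.append_assoc

theorem pv_B_closed (l : List Int) (hl : l.Nodup) : pvPerms l 3 = pvTotal l := by
  rw [show (3 : Nat) = 1 + 2 from rfl, pv_expand, pv_picks_eq l hl]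
  unfold pvTotal
  simp only [List.flatMap_map]
  apply pv_flatMap_congr
  intro a _
  rw [pv_perms_two _ (hl.filter _), pv_mid_eq l a, List.map_flatMap]
  apply pv_flatMap_congr
  intro b _
  simp [List.map_map, Function.comp]

theorem pv_AB (ns ne : Int) :
    create_three_digits ns ne = create_three_digits_alt ns ne := by
  rw [pv_A_closed]
  show _ = (((pvPerms (PySem.List.pyRange ns (ne + 1) 1) 3).length : Int),
            pvPerms (PySem.List.pyRange ns (ne + 1) 1) 3)
  rw [pv_B_closed _ (by simpa using PySem.List.nodup_pyRange_one ns (ne + 1))]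

-- ===== VERDICT (by name: the statement is the Claim_ definition above) =====
theorem create_three_digits_spec : Claim_equal_create_three_digits := by
  intro ns ne _
  unfold Spec_create_three_digits
  exact pv_AB ns ne
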